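-- pv_equiv track=rewrite | github.com/zh3nl/Interesting-Problems | CodeSignal/Python/Array Iteration from Middle to Ends/Pairing Array Elements/solution.py | solution
-- ===== SOURCE A (Python) =====
-- def solution(numbers):
--     # TODO: Implement the function to pair the elements from the middle to ends of the list
--     mid = len(numbers) // 2
--
--     if len(numbers) % 2 == 1:
--         left = mid - 1
--         right = mid + 1
--         result = [(numbers[mid], 0)]
--     else:
--         left = mid - 1
--         right = mid
--         result = []
--
--     while left >= 0 and right < len(numbers):
--         result.append((numbers[left], numbers[right]))
--         left -= 1
--         right += 1
--
--     return result
-- ===== SOURCE B (Python) =====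
-- def solution(numbers):
--     # Walk from the two ends inward, collecting the outermost-first pairs,
--     # then reverse once to get the middle-to-ends order.
--     pairs = []
--     i, j = 0, len(numbers) - 1
--     while i < j:
--         pairs.append((numbers[i], numbers[j]))
--         i += 1
--         j -= 1
--     if i == j:
--         pairs.append((numbers[i], 0))
--     pairs.reverse()
--     return pairs
-- ===== Notes on version B (the rewrite author's own statement) =====
-- stated objective: alternative
-- what changed: traverses in the opposite order: instead of computing the midpoint and expanding two pointers outward from it, B walks two pointers from the ends inward (no midpoint arithmetic, the odd middle falls out as i == j) and builds the list back-to-front, reversing once at the end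
import Mathlib
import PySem

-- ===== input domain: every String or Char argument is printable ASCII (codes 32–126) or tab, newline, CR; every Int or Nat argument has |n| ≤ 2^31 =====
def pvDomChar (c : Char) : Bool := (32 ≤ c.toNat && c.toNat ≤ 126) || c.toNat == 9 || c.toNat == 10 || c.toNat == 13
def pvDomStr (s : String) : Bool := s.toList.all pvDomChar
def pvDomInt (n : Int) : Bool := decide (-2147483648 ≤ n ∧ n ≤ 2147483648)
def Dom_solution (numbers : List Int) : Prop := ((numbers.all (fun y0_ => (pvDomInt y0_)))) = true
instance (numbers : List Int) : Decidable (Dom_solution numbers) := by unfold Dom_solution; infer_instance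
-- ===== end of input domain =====

-- B traverses in the opposite order: two pointers from the ends inward, building the result back-to-front, with one reverse at the end (alternative decomposition, same cost).

-- ===== PORT A =====
-- while left >= 0 and right < len(numbers): append (numbers[left], numbers[right]); fuel = len suffices
def solLoop (numbers : List Int) (left right : Int) (result : List (Int × Int)) : Nat → List (Int × Int)
  | 0 => result
  | fuel + 1 =>
    if left ≥ 0 ∧ right < (numbers.length : Int) then
      solLoop numbers (left - 1) (right + 1)
        (result ++ [(PySem.List.pyGetD numbers left 0, PySem.List.pyGetD numbers right 0)]) fuel
    else result

def solution (numbers : List Int) : List (Int × Int) :=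
  let n : Int := numbers.length
  let mid : Int := PySem.Int.floordiv n 2
  if PySem.Int.mod n 2 = 1 then
    solLoop numbers (mid - 1) (mid + 1) [(PySem.List.pyGetD numbers mid 0, 0)] numbers.length
  else
    solLoop numbers (mid - 1) mid [] numbers.length

-- ===== PORT B =====
-- while i < j: append (numbers[i], numbers[j]); i += 1; j -= 1 — terminates since (j - i).toNat shrinks
def altLoop (numbers : List Int) (i j : Int) (pairs : List (Int × Int)) : List (Int × Int) :=
  if h : i < j then
    altLoop numbers (i + 1) (j - 1)
      (pairs ++ [(PySem.List.pyGetD numbers i 0, PySem.List.pyGetD numbers j 0)])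
  else if i = j then pairs ++ [(PySem.List.pyGetD numbers i 0, 0)]
  else pairs
termination_by (j - i).toNat
decreasing_by omega

def solution_alt (numbers : List Int) : List (Int × Int) :=
  (altLoop numbers 0 ((numbers.length : Int) - 1) []).reverse

-- ===== PRECONDITION & SPEC =====
def Spec_solution (numbers : List Int) (out : List (Int × Int)) : Prop := out = solution_alt numbers
instance (numbers : List Int) (out : List (Int × Int)) : Decidable (Spec_solution numbers out) := by unfold Spec_solution; infer_instance

-- ===== CLAIM (what is proved, stated in full; the proofs are below) =====
def Claim_equal_solution : Prop := ∀ (numbers : List Int), Dom_solution numbers → Spec_solution numbers (solution numbers)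

-- ===== LEMMAS AND PROOFS =====

-- closed form both ports are reduced to
def midForm (numbers : List Int) : List (Int × Int) :=
  (if numbers.length % 2 = 1 then [(numbers.getD (numbers.length / 2) 0, 0)] else [])
    ++ List.zip ((numbers.take (numbers.length / 2)).reverse)
        (numbers.drop (numbers.length / 2 + numbers.length % 2))

-- outermost-first pair list, as B's loop produces before the reverse
def outPairs : List Int → List (Int × Int)
  | [] => []
  | [x] => [(x, 0)]
  | a :: b :: l =>
      (a, (b :: l).getLast (by simp)) :: outPairs ((b :: l).dropLast)
termination_by l => l.length
decreasing_by simp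

lemma solLoop_eq (numbers : List Int) :
    ∀ (fuel : Nat) (left : Int) (r : Nat) (acc : List (Int × Int)),
      (left + 1).toNat ≤ fuel → left < (numbers.length : Int) →
      solLoop numbers left (r : Int) acc fuel
        = acc ++ List.zip ((numbers.take (left + 1).toNat).reverse) (numbers.drop r) := by
  intro fuel
  induction fuel with
  | zero =>
    intro left r acc hf _
    have : (left + 1).toNat = 0 := Nat.le_zero.mp hf
    simp [solLoop, this]
  | succ fuel ih =>
    intro left r acc hf hlt
    by_cases hc : left ≥ 0 ∧ (r : Int) < (numbers.length : Int)
    · obtain ⟨hl0, hr⟩ := hc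
      have hln : left.toNat < numbers.length := by omega
      have hrn : r < numbers.length := by exact_mod_cast hr
      have hga : PySem.List.pyGetD numbers left 0 = numbers[left.toNat] :=
        PySem.List.pyGetD_eq_getElem numbers 0 hl0 hlt
      have hgb : PySem.List.pyGetD numbers (r : Int) 0 = numbers[r] := by
        simpa using PySem.List.pyGetD_eq_getElem numbers 0 (by positivity) hr
      have hstep : solLoop numbers left (r : Int) acc (fuel + 1)
          = solLoop numbers (left - 1) ((r : Int) + 1)
              (acc ++ [(numbers[left.toNat], numbers[r])]) fuel := by
        simp [solLoop, hl0, hr, hga, hgb]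
      rw [hstep]
      have hcast : ((r : Int) + 1) = ((r + 1 : Nat) : Int) := by push_cast; ring
      rw [hcast, ih (left - 1) (r + 1) _ (by omega) (by omega)]
      have htn : (left + 1).toNat = left.toNat + 1 := by omega
      have htn' : (left - 1 + 1).toNat = left.toNat := by omega
      have hrev : (List.take (left.toNat + 1) numbers).reverse
          = numbers[left.toNat] :: (List.take left.toNat numbers).reverse := by
        rw [List.take_add_one, List.getElem?_eq_getElem hln]
        simp
      rw [htn, htn', hrev, List.drop_eq_getElem_cons hrn, List.zip_cons_cons]
      simp
    · have hres : solLoop numbers left (r : Int) acc (fuel + 1) = acc := by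
        simp only [solLoop]
        rw [if_neg hc]
      rw [hres]
      rcases not_and_or.mp hc with h | h
      · have : (left + 1).toNat = 0 := by omega
        simp [this]
      · have : numbers.length ≤ r := by
          have : ¬ ((r : Int) < (numbers.length : Int)) := h
          exact_mod_cast not_lt.mp this
        simp [List.drop_eq_nil_of_le this]

lemma solution_eq_midForm (numbers : List Int) : solution numbers = midForm numbers := by
  set n := numbers.length with hn
  have hfd : PySem.Int.floordiv (n : Int) 2 = ((n / 2 : Nat) : Int) := by
    exact_mod_cast PySem.Int.floordiv_natCast n 2
  have hmd : PySem.Int.mod (n : Int) 2 = ((n % 2 : Nat) : Int) := by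
    exact_mod_cast PySem.Int.mod_natCast n 2
  set m := n / 2 with hm
  rcases Nat.even_or_odd n with he | ho
  · have h2 : n % 2 = 0 := Nat.even_iff.mp he
    have hmod0 : PySem.Int.mod (n : Int) 2 = 0 := by rw [hmd, h2]; rfl
    have hA : solution numbers = solLoop numbers ((m : Int) - 1) (m : Int) [] n := by
      simp only [solution, hfd, hmod0, ← hn]
      norm_num
    rw [hA, solLoop_eq numbers n ((m : Int) - 1) m [] (by omega) (by omega)]
    have htake : ((m : Int) - 1 + 1).toNat = m := by omega
    simp [midForm, ← hn, ← hm, h2]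
  · have h2 : n % 2 = 1 := Nat.odd_iff.mp ho
    have hmod1 : PySem.Int.mod (n : Int) 2 = 1 := by rw [hmd, h2]; rfl
    have hmlt : m < n := by omega
    have hA : solution numbers
        = solLoop numbers ((m : Int) - 1) (((m + 1 : Nat) : Int))
            [(PySem.List.pyGetD numbers ((m : Int)) 0, 0)] n := by
      simp only [solution, hfd, hmod1, ← hn]
      norm_num
    rw [hA, solLoop_eq numbers n ((m : Int) - 1) (m + 1) _ (by omega) (by omega)]
    have htake : ((m : Int) - 1 + 1).toNat = m := by omega
    have hget : PySem.List.pyGetD numbers ((m : Int)) 0 = numbers.getD m 0 := by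
      rw [PySem.List.pyGetD_eq_getElem numbers 0 (by positivity) (by exact_mod_cast hmlt)]
      simp [List.getD, List.getElem?_eq_getElem (hn ▸ hmlt)]
    simp [midForm, ← hn, ← hm, h2, hget]

-- the closed form satisfies B's outer-pair recursion
lemma midForm_outer (a b : Int) (l : List Int) :
    midForm (a :: (l ++ [b])) = midForm l ++ [(a, b)] := by
  have hlen : (a :: (l ++ [b])).length = l.length + 2 := by simp
  have hm2 : (l.length + 2) / 2 = l.length / 2 + 1 := by omega
  have hp : (l.length + 2) % 2 = l.length % 2 := by omega
  have htake : (a :: (l ++ [b])).take ((l.length + 2) / 2) = a :: l.take (l.length / 2) := by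
    rw [hm2, List.take_succ_cons, List.take_append_of_le_length (by omega)]
  have hdrop : (a :: (l ++ [b])).drop ((l.length + 2) / 2 + (l.length + 2) % 2)
      = l.drop (l.length / 2 + l.length % 2) ++ [b] := by
    rw [hm2, hp]
    have h1 : l.length / 2 + 1 + l.length % 2 = (l.length / 2 + l.length % 2) + 1 := by omega
    rw [h1, List.drop_succ_cons, List.drop_append_of_le_length (by omega)]
  have hzlen : (l.take (l.length / 2)).reverse.length
      = (l.drop (l.length / 2 + l.length % 2)).length := by
    simp; omega
  have hzip : List.zip (((a :: (l ++ [b])).take ((l.length + 2) / 2)).reverse)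
        ((a :: (l ++ [b])).drop ((l.length + 2) / 2 + (l.length + 2) % 2))
      = List.zip ((l.take (l.length / 2)).reverse) (l.drop (l.length / 2 + l.length % 2))
          ++ [(a, b)] := by
    rw [htake, hdrop, List.reverse_cons, List.zip_append hzlen]
    simp
  simp only [midForm, hlen]
  rw [hzip, hp]
  rcases Nat.even_or_odd l.length with he | ho
  · have h2 : l.length % 2 = 0 := Nat.even_iff.mp he
    simp [h2]
  · have h2 : l.length % 2 = 1 := Nat.odd_iff.mp ho
    simp [h2, List.getD_eq_getElem?_getD,
      List.getElem?_append_left (show l.length / 2 < l.length by omega)]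

lemma outPairs_reverse_eq : ∀ (xs : List Int), (outPairs xs).reverse = midForm xs := by
  intro xs
  induction hN : xs.length using Nat.strong_induction_on generalizing xs with
  | _ N ih =>
  match xs with
  | [] => simp [outPairs, midForm]
  | [x] => simp [outPairs, midForm, List.getD]
  | a :: b :: l =>
    have hy : (b :: l) ≠ [] := by simp
    have hsplit : b :: l = (b :: l).dropLast ++ [(b :: l).getLast hy] :=
      (List.dropLast_append_getLast hy).symm
    have hxs : a :: b :: l = a :: ((b :: l).dropLast ++ [(b :: l).getLast hy]) := by
      rw [← hsplit]
    rw [outPairs]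
    rw [List.reverse_cons,
        ih ((b :: l).dropLast).length (by simp at hN ⊢; omega) _ rfl]
    rw [hxs, midForm_outer]

lemma altLoop_eq (numbers : List Int) :
    ∀ (k : Nat) (i : Nat) (j : Int) (acc : List (Int × Int)),
      j + 1 - i = (k : Int) → j < (numbers.length : Int) →
      altLoop numbers (i : Int) j acc
        = acc ++ outPairs ((numbers.drop i).take k) := by
  intro k
  induction k using Nat.strong_induction_on with
  | _ k ih =>
  intro i j acc hk hj
  rw [altLoop]
  by_cases hij : (i : Int) < j
  · obtain ⟨k', rfl⟩ : ∃ k', k = k' + 2 := ⟨k - 2, by omega⟩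
    rw [dif_pos hij]
    have hin : i < numbers.length := by omega
    have hj' : j = ((i + k' + 1 : Nat) : Int) := by push_cast; omega
    have hjn : i + k' + 1 < numbers.length := by omega
    have hgi : PySem.List.pyGetD numbers (i : Int) 0 = numbers[i] := by
      simp [List.getElem?_eq_getElem hin]
    have hgj : PySem.List.pyGetD numbers j 0 = numbers[i + k' + 1] := by
      rw [hj', PySem.List.pyGetD_natCast]
      simp [List.getD_eq_getElem?_getD, List.getElem?_eq_getElem hjn]
    rw [hgi, hgj]
    have hcast : (i : Int) + 1 = ((i + 1 : Nat) : Int) := by push_cast; ring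
    rw [hcast, ih k' (by omega) (i + 1) (j - 1) _ (by push_cast; omega) (by omega)]
    -- segment decomposition: (drop i).take (k'+2) = x_i :: ((drop (i+1)).take k' ++ [x_{i+k'+1}])
    have hseg : (numbers.drop i).take (k' + 2)
        = numbers[i] :: ((numbers.drop (i + 1)).take k' ++ [numbers[i + k' + 1]]) := by
      rw [List.drop_eq_getElem_cons hin, List.take_succ_cons]
      have h1 : (numbers.drop (i + 1)).take (k' + 1)
          = (numbers.drop (i + 1)).take k' ++ ((numbers.drop (i + 1))[k']?).toList :=
        List.take_add_one
      have h2 : (numbers.drop (i + 1))[k']? = some numbers[i + k' + 1] := by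
        rw [List.getElem?_drop]
        have he : i + 1 + k' = i + k' + 1 := by omega
        rw [he, List.getElem?_eq_getElem hjn]
      rw [h1, h2]
      rfl
    rw [hseg]
    -- outPairs on x :: (seg ++ [y]) = (x, y) :: outPairs seg
    have hop : ∀ (x y : Int) (seg : List Int),
        outPairs (x :: (seg ++ [y])) = (x, y) :: outPairs seg := by
      intro x y seg
      match seg with
      | [] => simp [outPairs]
      | c :: cs =>
        rw [show x :: ((c :: cs) ++ [y]) = x :: c :: (cs ++ [y]) by simp, outPairs]
        congr 1
        · congr 1
          simp
        · congr 1
          show ((c :: cs) ++ [y]).dropLast = c :: cs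
          exact List.dropLast_concat
    rw [hop]
    simp
  · rw [dif_neg hij]
    by_cases hij' : (i : Int) = j
    · have hk1 : k = 1 := by omega
      subst hk1
      have hin : i < numbers.length := by omega
      have hg : PySem.List.pyGetD numbers (i : Int) 0 = numbers[i] := by
        simp [List.getElem?_eq_getElem hin]
      rw [if_pos hij', hg]
      rw [List.take_one, List.head?_drop, List.getElem?_eq_getElem hin]
      simp [outPairs]
    · have hk0 : k = 0 := by omega
      subst hk0
      rw [if_neg hij']
      simp [outPairs]

lemma solution_alt_eq_midForm (numbers : List Int) :
    solution_alt numbers = midForm numbers := by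
  unfold solution_alt
  have h0 : ((0 : Nat) : Int) = (0 : Int) := rfl
  rw [← h0, altLoop_eq numbers numbers.length 0 ((numbers.length : Int) - 1) []
        (by push_cast; ring) (by omega)]
  simp [outPairs_reverse_eq]

-- ===== VERDICT (by name: the statement is the Claim_ definition above) =====
theorem solution_spec : Claim_equal_solution := by
  intro numbers _
  unfold Spec_solution
  rw [solution_eq_midForm, solution_alt_eq_midForm]
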